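-- pv_equiv track=rewrite | github.com/RamseyPengTianhu/ihr_sim_lab | action_provider/action_provider_ros_ik.py | _build_upper_body_indices
-- ===== SOURCE A (Python) =====
-- from typing import Optional, Dict, List
--
-- def _build_upper_body_indices(robot_joint_names: List[str]) -> List[int]:
--     """根据关节名猜上肢关节索引；若你有显式名单，可通过 --ik_upper_body_names 传入。"""
--     keys = [
--         "shoulder_pitch", "shoulder_roll", "shoulder_yaw",
--         "elbow", "wrist_roll", "wrist_pitch", "wrist_yaw"
--     ]
--     names = [n.lower() for n in robot_joint_names]
--     idx: List[int] = []
--     for side in ["left", "right"]: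
--         for k in keys:
--             cand = [i for i, n in enumerate(names) if side in n and k in n]
--             if cand:
--                 idx.append(cand[0])
--     # 去重并保持顺序
--     seen, uniq = set(), []
--     for i in idx:
--         if i not in seen:
--             uniq.append(i); seen.add(i)
--     return uniq
-- ===== SOURCE B (Python) =====
-- def _build_upper_body_indices(robot_joint_names):
--     """根据关节名猜上肢关节索引；若你有显式名单，可通过 --ik_upper_body_names 传入。"""
--     keys = [
--         "shoulder_pitch", "shoulder_roll", "shoulder_yaw",
--         "elbow", "wrist_roll", "wrist_pitch", "wrist_yaw"
--     ]
--     pairs = [(side, k) for side in ("left", "right") for k in keys]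
--     # one pass over the names: record, for each (side, key) pair, the FIRST matching index
--     table = {}
--     for i, name in enumerate(robot_joint_names):
--         n = name.lower()
--         for p in pairs:
--             if p not in table and p[0] in n and p[1] in n:
--                 table[p] = i
--     # emit in priority order, deduplicating on the fly
--     out = []
--     for p in pairs:
--         if p in table and table[p] not in out:
--             out.append(table[p])
--     return out
-- ===== Notes on version B (the rewrite author's own statement) =====
-- stated objective: alternative
-- what changed: Instead of 14 separate full scans of the name list (one per side/key pair), B makes a single pass over the enumerated lowercased names building a first-match index table keyed by (side,key), then emits indices in the fixed priority order with on-the-fly dedup.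
import Mathlib
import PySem

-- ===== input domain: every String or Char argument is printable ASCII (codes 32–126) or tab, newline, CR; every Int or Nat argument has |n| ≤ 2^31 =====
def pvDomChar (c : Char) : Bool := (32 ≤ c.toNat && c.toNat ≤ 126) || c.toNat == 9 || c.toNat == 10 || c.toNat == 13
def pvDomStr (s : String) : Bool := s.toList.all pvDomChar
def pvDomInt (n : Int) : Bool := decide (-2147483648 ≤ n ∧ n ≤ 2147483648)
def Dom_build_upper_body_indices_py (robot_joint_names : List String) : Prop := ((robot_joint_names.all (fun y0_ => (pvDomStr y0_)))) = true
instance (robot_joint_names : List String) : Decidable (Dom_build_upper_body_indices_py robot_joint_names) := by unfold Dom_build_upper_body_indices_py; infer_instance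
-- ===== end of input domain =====

-- B replaces A's 14 repeated full scans of the name list by one pass that builds a
-- first-match index table keyed by (side, key), then emits in priority order (alternative).

-- ===== PORT A =====
def pvKeys : List String :=
  ["shoulder_pitch", "shoulder_roll", "shoulder_yaw",
   "elbow", "wrist_roll", "wrist_pitch", "wrist_yaw"]

def build_upper_body_indices_py (robot_joint_names : List String) : List Int :=
  let names := robot_joint_names.map PySem.Str.lower
  let idx : List Int :=
    ["left", "right"].foldl (fun acc side =>
      pvKeys.foldl (fun acc k =>
        let cand := ((PySem.List.enumerate names).filter
          (fun p => PySem.Str.isIn side p.2 && PySem.Str.isIn k p.2)).map (·.1)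
        match cand.head? with
        | none => acc
        | some c => acc ++ [c]) acc) []
  (idx.foldl (fun (st : PySem.Set Int × List Int) i =>
      if PySem.Set.contains st.1 i then st else (PySem.Set.add st.1 i, st.2 ++ [i]))
    (PySem.Set.empty, [])).2

-- ===== PORT B =====
def pvPairs : List (String × String) :=
  ["left", "right"].flatMap (fun side => pvKeys.map (fun k => (side, k)))

def build_upper_body_indices_py_alt (robot_joint_names : List String) : List Int :=
  let table : PySem.Dict (String × String) Int :=
    (PySem.List.enumerate robot_joint_names).foldl (fun d pr =>
      let n := PySem.Str.lower pr.2
      pvPairs.foldl (fun d q =>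
        if !(PySem.Dict.contains d q) && PySem.Str.isIn q.1 n && PySem.Str.isIn q.2 n
        then PySem.Dict.insert d q pr.1 else d) d) PySem.Dict.empty
  pvPairs.foldl (fun out q =>
    match PySem.Dict.get? table q with
    | some i => if out.contains i then out else out ++ [i]
    | none => out) []

-- ===== PRECONDITION & SPEC =====
def Spec_build_upper_body_indices_py (robot_joint_names : List String) (out : List Int) : Prop := out = build_upper_body_indices_py_alt robot_joint_names
instance (robot_joint_names : List String) (out : List Int) : Decidable (Spec_build_upper_body_indices_py robot_joint_names out) := by unfold Spec_build_upper_body_indices_py; infer_instance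

-- ===== CLAIM (what is proved, stated in full; the proofs are below) =====
def Claim_equal_build_upper_body_indices_py : Prop := ∀ (robot_joint_names : List String), Dom_build_upper_body_indices_py robot_joint_names → Spec_build_upper_body_indices_py robot_joint_names (build_upper_body_indices_py robot_joint_names)

-- ===== LEMMAS AND PROOFS =====

-- whether the (side, key) pair q matches the lowercased name s
def pvMatch (q : String × String) (s : String) : Bool :=
  PySem.Str.isIn q.1 (PySem.Str.lower s) && PySem.Str.isIn q.2 (PySem.Str.lower s)

-- first enumerate-index whose name matches q
def pvFirst (robot_joint_names : List String) (q : String × String) : Option Int :=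
  ((PySem.List.enumerate robot_joint_names).find? (fun p => pvMatch q p.2)).map (·.1)

-- ordered dedup as a plain fold
def pvDedup (l : List Int) : List Int :=
  l.foldl (fun out i => if out.contains i then out else out ++ [i]) []

-- ---- generic fold lemmas ----

theorem pv_foldl_opt_append (h : (String × String) → Option Int) :
    ∀ (l : List (String × String)) (acc : List Int),
      l.foldl (fun acc q => match h q with | none => acc | some c => acc ++ [c]) acc
        = acc ++ l.filterMap h := by
  intro l
  induction l with
  | nil => intro acc; simp
  | cons q t ih =>
    intro acc
    cases hq : h q with
    | none => simp [List.foldl_cons, hq, ih]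
    | some c => simp [List.foldl_cons, hq, ih]

theorem pv_foldl_match_filterMap (h : (String × String) → Option Int)
    (g : List Int → Int → List Int) :
    ∀ (l : List (String × String)) (out : List Int),
      l.foldl (fun out q => match h q with | some i => g out i | none => out) out
        = (l.filterMap h).foldl g out := by
  intro l
  induction l with
  | nil => intro out; simp
  | cons q t ih =>
    intro out
    cases hq : h q with
    | none => simp [List.foldl_cons, hq, ih]
    | some i => simp [List.foldl_cons, hq, ih]

-- A's seen-set dedup fold equals the plain contains-based dedup fold
theorem pv_dedupA_eq :
    ∀ (l u : List Int),
      ((l.foldl (fun (st : PySem.Set Int × List Int) i =>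
          if PySem.Set.contains st.1 i then st else (PySem.Set.add st.1 i, st.2 ++ [i]))
        ((u : PySem.Set Int), u)).2)
      = l.foldl (fun out i => if out.contains i then out else out ++ [i]) u := by
  intro l
  induction l with
  | nil => intro u; simp
  | cons i t ih =>
    intro u
    by_cases h : PySem.Set.contains u i = true
    · have h' : u.contains i = true := by
        simpa [PySem.Set.contains_eq_listContains] using h
      simp only [List.foldl_cons, h, if_true, h', ih u]
    · have hf : PySem.Set.contains (u : PySem.Set Int) i = false := eq_false_of_ne_true h
      have h' : u.contains i = false := by
        rw [← PySem.Set.contains_eq_listContains]; exact hf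
      have hnm : i ∉ u := by simpa using h'
      have hadd : PySem.Set.add (u : PySem.Set Int) i = u ++ [i] := by
        simp [PySem.Set.add, hnm]
      simp only [List.foldl_cons, hf, Bool.false_eq_true, if_false, h', hadd]
      exact ih (u ++ [i])

-- ---- A side ----

-- the head of A's candidate list for pair q is pvFirst
theorem pv_cand_head (robot_joint_names : List String) (q : String × String) :
    (((PySem.List.enumerate (robot_joint_names.map PySem.Str.lower)).filter
        (fun p => PySem.Str.isIn q.1 p.2 && PySem.Str.isIn q.2 p.2)).map (·.1)).head?
      = pvFirst robot_joint_names q := by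
  unfold pvFirst
  rw [List.head?_map, List.head?_filter]
  suffices H : ∀ (s : Int) (l : List String),
      ((PySem.List.enumerate (l.map PySem.Str.lower) s).find?
          (fun p => PySem.Str.isIn q.1 p.2 && PySem.Str.isIn q.2 p.2)).map (·.1)
        = ((PySem.List.enumerate l s).find? (fun p => pvMatch q p.2)).map (·.1) by
    exact H 0 robot_joint_names
  intro s l
  induction l generalizing s with
  | nil => simp [PySem.List.enumerate_nil]
  | cons y ys ihl =>
    simp only [List.map_cons, PySem.List.enumerate_cons, List.find?_cons]
    have e : (PySem.Str.isIn q.1 (PySem.Str.lower y) && PySem.Str.isIn q.2 (PySem.Str.lower y))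
        = pvMatch q y := rfl
    cases hm : pvMatch q y with
    | true => simp only [e, hm]; rfl
    | false => simp only [e, hm]; exact ihl (s + 1)

theorem pv_A_eq (robot_joint_names : List String) :
    build_upper_body_indices_py robot_joint_names
      = pvDedup (pvPairs.filterMap (pvFirst robot_joint_names)) := by
  simp only [build_upper_body_indices_py, pvDedup]
  have hidx :
      (["left", "right"].foldl (fun acc side =>
        pvKeys.foldl (fun acc k =>
          let cand := ((PySem.List.enumerate (robot_joint_names.map PySem.Str.lower)).filter
            (fun p => PySem.Str.isIn side p.2 && PySem.Str.isIn k p.2)).map (·.1)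
          match cand.head? with
          | none => acc
          | some c => acc ++ [c]) acc) ([] : List Int))
      = pvPairs.filterMap (pvFirst robot_joint_names) := by
    rw [show pvPairs.filterMap (pvFirst robot_joint_names)
          = pvPairs.foldl (fun acc q =>
              match pvFirst robot_joint_names q with
              | none => acc
              | some c => acc ++ [c]) [] from
        ((pv_foldl_opt_append (pvFirst robot_joint_names) pvPairs []).trans (by simp)).symm]
    unfold pvPairs
    rw [List.foldl_flatMap]
    refine PySem.List.foldl_congr_mem _ _ _ _ ?_
    intro acc side _
    rw [List.foldl_map]
    refine PySem.List.foldl_congr_mem _ _ _ _ ?_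
    intro acc k _
    simp only [pv_cand_head robot_joint_names (side, k)]
  rw [hidx]
  exact pv_dedupA_eq _ []

-- ---- B side ----

-- effect of the inner fold (one name, all pairs) on one lookup; generic in the
-- two membership tests c1, c2 so the proof never unfolds them
theorem pv_inner_get? (i : Int) (c1 c2 : (String × String) → Bool) (q' : String × String) :
    ∀ (ps : List (String × String)) (d : PySem.Dict (String × String) Int),
      (ps.foldl (fun d q =>
          if !(PySem.Dict.contains d q) && c1 q && c2 q
          then PySem.Dict.insert d q i else d) d).get? q'
        = if q' ∈ ps ∧ (c1 q' && c2 q') = true ∧ d.contains q' = false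
          then some i else d.get? q' := by
  intro ps
  induction ps with
  | nil => intro d; simp
  | cons q t ih =>
    intro d
    by_cases hqq : q = q'
    · subst hqq
      by_cases hc : d.contains q = true
      · simp only [List.foldl_cons, hc, Bool.not_true, Bool.false_and, Bool.false_eq_true,
          if_false, ih]
        simp
      · have hc' : d.contains q = false := eq_false_of_ne_true hc
        by_cases hm : (c1 q && c2 q) = true
        · have hstep : (!(d.contains q) && c1 q && c2 q) = true := by
            simp only [hc', Bool.not_false, Bool.true_and]; exact hm
          simp only [List.foldl_cons, hstep, if_true, ih]
          have hcontains : (d.insert q i).contains q = true := by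
            simp
          simp [hcontains, hc', hm, PySem.Dict.get?_insert_self]
        · have hm' : (c1 q && c2 q) = false := eq_false_of_ne_true hm
          have hstep : (!(d.contains q) && c1 q && c2 q) = false := by
            simp only [hc', Bool.not_false, Bool.true_and]; exact hm'
          simp only [List.foldl_cons, hstep, Bool.false_eq_true, if_false, ih]
          simp [hm']
    · have hne : q' ≠ q := fun h => hqq h.symm
      by_cases hstep : (!(PySem.Dict.contains d q) && c1 q && c2 q) = true
      · simp only [List.foldl_cons, hstep, if_true, ih]
        have hget : (d.insert q i).get? q' = d.get? q' :=
          PySem.Dict.get?_insert_of_ne d i hne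
        have hcont : (d.insert q i).contains q' = d.contains q' := by
          simp [PySem.Dict.contains_insert, hne]
        rw [hget, hcont]
        by_cases hmem' : q' ∈ t
        · simp [hmem', hne]
        · simp [hmem', hne]
      · have hstep' : (!(PySem.Dict.contains d q) && c1 q && c2 q) = false :=
          eq_false_of_ne_true hstep
        simp only [List.foldl_cons, hstep', Bool.false_eq_true, if_false, ih]
        by_cases hmem' : q' ∈ t
        · simp [hmem', hne]
        · simp [hmem', hne]

-- effect of the whole pass on one lookup: the first matching index
theorem pv_outer_get? (c1 c2 : String → (String × String) → Bool)
    (q' : String × String) (hq' : q' ∈ pvPairs) :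
    ∀ (l : List String) (s : Int) (d : PySem.Dict (String × String) Int),
      ((PySem.List.enumerate l s).foldl (fun d pr =>
          pvPairs.foldl (fun d q =>
            if !(PySem.Dict.contains d q) && c1 pr.2 q && c2 pr.2 q
            then PySem.Dict.insert d q pr.1 else d) d) d).get? q'
        = (d.get? q').elim
            (((PySem.List.enumerate l s).find?
                (fun p => c1 p.2 q' && c2 p.2 q')).map (·.1))
            some := by
  intro l
  induction l with
  | nil =>
    intro s d
    simp only [PySem.List.enumerate_nil, List.foldl_nil, List.find?_nil, Option.map_none]
    cases d.get? q' <;> simp [Option.elim]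
  | cons x xs ih =>
    intro s d
    simp only [PySem.List.enumerate_cons, List.foldl_cons, List.find?_cons]
    rw [ih]
    rw [pv_inner_get?]
    cases hm : (c1 x q' && c2 x q') with
    | true =>
      by_cases hc : d.contains q' = true
      · have hsome : ∃ v, d.get? q' = some v := by
          have hh := PySem.Dict.contains_eq_isSome_get? d q'
          rw [hc] at hh
          cases hg : d.get? q' with
          | none => rw [hg] at hh; simp at hh
          | some v => exact ⟨v, rfl⟩
        obtain ⟨v, hv⟩ := hsome
        simp [hc, hv, Option.elim]
      · have hc' : d.contains q' = false := eq_false_of_ne_true hc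
        have hnone : d.get? q' = none := by
          have hh := PySem.Dict.contains_eq_isSome_get? d q'
          rw [hc'] at hh
          cases hg : d.get? q' with
          | none => rfl
          | some v => rw [hg] at hh; simp at hh
        simp [hq', hc', hnone, Option.elim]
    | false =>
      simp

theorem pv_B_eq (robot_joint_names : List String) :
    build_upper_body_indices_py_alt robot_joint_names
      = pvDedup (pvPairs.filterMap (pvFirst robot_joint_names)) := by
  simp only [build_upper_body_indices_py_alt, pvDedup]
  rw [← pv_foldl_match_filterMap (pvFirst robot_joint_names)
        (fun out i => if out.contains i then out else out ++ [i]) pvPairs []]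
  refine PySem.List.foldl_congr_mem _ _ _ _ ?_
  intro out q hq
  have hlook := pv_outer_get?
      (fun s q => PySem.Str.isIn q.1 (PySem.Str.lower s))
      (fun s q => PySem.Str.isIn q.2 (PySem.Str.lower s))
      q hq robot_joint_names 0 PySem.Dict.empty
  simp only [PySem.Dict.get?_empty, Option.elim] at hlook
  rw [hlook]
  rfl

-- ===== VERDICT (by name: the statement is the Claim_ definition above) =====
theorem build_upper_body_indices_py_spec : Claim_equal_build_upper_body_indices_py := by
  intro rjn _
  unfold Spec_build_upper_body_indices_py
  rw [pv_A_eq, pv_B_eq]
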